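-- pv_equiv track=rewrite | github.com/Mopchik/Mopchik_alphabet2 | generate_game.py | get_count_from_words_pos
-- ===== SOURCE A (Python) =====
-- def get_count_from_words_pos(words_pos):
--     setka = [[0] * 8 for _ in range(6)]
--     count = 0
--     for word, (x, y, mode) in words_pos.items():
--         for _ in word:
--             setka[y][x] += 1
--             if setka[y][x] > 1:
--                 count += 1
--             if mode == 'horizontal':
--                 x += 1
--             else:
--                 y += 1
--     return count
-- ===== SOURCE B (Python) =====
-- def get_count_from_words_pos(words_pos):
--     # fill-then-subtract: place every character (total), then one second pass
--     # counts occupied cells; overlaps = total placed - distinct occupied cells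
--     setka = [[0] * 8 for _ in range(6)]
--     total = 0
--     for word, (x, y, mode) in words_pos.items():
--         dx, dy = (1, 0) if mode == 'horizontal' else (0, 1)
--         for _ in word:
--             setka[y][x] += 1
--             total += 1
--             x += dx
--             y += dy
--     occupied = sum(1 for row in setka for cell in row if cell)
--     return total - occupied
-- ===== Notes on version B (the rewrite author's own statement) =====
-- stated objective: alternative
-- what changed: Instead of testing each cell for >1 while placing, B fills the grid counting only total characters placed, then a second pass counts distinct occupied cells and returns total - occupied (identity sum(k-1) = total - distinct).
import Mathlib
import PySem

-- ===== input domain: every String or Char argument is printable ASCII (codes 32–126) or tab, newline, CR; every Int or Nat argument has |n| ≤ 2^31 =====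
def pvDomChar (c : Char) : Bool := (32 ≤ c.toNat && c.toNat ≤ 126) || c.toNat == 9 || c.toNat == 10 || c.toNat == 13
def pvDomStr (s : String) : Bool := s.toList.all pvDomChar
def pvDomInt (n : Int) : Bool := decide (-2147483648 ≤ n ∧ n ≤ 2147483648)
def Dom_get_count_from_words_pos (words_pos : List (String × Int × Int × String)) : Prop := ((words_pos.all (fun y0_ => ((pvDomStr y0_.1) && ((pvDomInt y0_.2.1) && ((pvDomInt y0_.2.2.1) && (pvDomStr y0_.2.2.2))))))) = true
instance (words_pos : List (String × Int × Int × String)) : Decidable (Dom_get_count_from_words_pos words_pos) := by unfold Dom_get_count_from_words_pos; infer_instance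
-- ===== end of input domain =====

-- B counts overlaps as (total characters placed) − (distinct occupied cells) in a
-- second pass over the grid, instead of A's inline >1 test; same cost, different decomposition.

-- ===== PORT A =====
-- setka[y][x] += 1  (Python negative-index wrapping; out-of-range = IndexError, excluded by Pre_)
def pvInc2d (g : List (List Int)) (y x : Int) : List (List Int) :=
  let row := PySem.List.pyGetD g y []
  PySem.List.pySetD g y (PySem.List.pySetD row x (PySem.List.pyGetD row x 0 + 1))

-- setka[y][x]
def pvGet2d (g : List (List Int)) (y x : Int) : Int :=
  PySem.List.pyGetD (PySem.List.pyGetD g y []) x 0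

-- [[0] * 8 for _ in range(6)]
def pvGridInit : List (List Int) := List.replicate 6 (List.replicate 8 0)

-- A's inner loop: for _ in word: increment, test > 1, advance per mode
def pvPlaceA : List Char → Int → Int → String → List (List Int) × Int → List (List Int) × Int
  | [], _, _, _, st => st
  | _ :: cs, x, y, mode, (g, c) =>
    let g' := pvInc2d g y x
    let c' := if 1 < pvGet2d g' y x then c + 1 else c
    if mode = "horizontal" then pvPlaceA cs (x + 1) y mode (g', c')
    else pvPlaceA cs x (y + 1) mode (g', c')

def get_count_from_words_pos (words_pos : List (String × Int × Int × String)) : Int :=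
  (words_pos.foldl (fun st p => pvPlaceA p.1.toList p.2.1 p.2.2.1 p.2.2.2 st)
    (pvGridInit, 0)).2

-- ===== PORT B =====
-- B's inner loop: increment the cell, count the character, advance by (dx, dy)
def pvPlaceB : List Char → Int → Int → Int → Int → List (List Int) × Int → List (List Int) × Int
  | [], _, _, _, _, st => st
  | _ :: cs, x, y, dx, dy, (g, t) => pvPlaceB cs (x + dx) (y + dy) dx dy (pvInc2d g y x, t + 1)

-- second pass: number of nonzero cells
def pvOccupied (g : List (List Int)) : Int :=
  g.foldl (fun a row => row.foldl (fun a c => if c ≠ 0 then a + 1 else a) a) 0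

def get_count_from_words_pos_alt (words_pos : List (String × Int × Int × String)) : Int :=
  let st := words_pos.foldl (fun st p =>
      let d : Int × Int := if p.2.2.2 = "horizontal" then (1, 0) else (0, 1)
      pvPlaceB p.1.toList p.2.1 p.2.2.1 d.1 d.2 st)
    (pvGridInit, 0)
  st.2 - pvOccupied st.1

-- ===== PRECONDITION & SPEC =====
-- pvOkWord L x y mode: every cell touched while writing a word of length L from (x,y)
-- is a valid (possibly negative, Python-wrapping) index into the 6×8 grid.
def pvOkWord (L : Nat) (x y : Int) (mode : String) : Bool :=
  L == 0 ||
    (if mode = "horizontal" then decide (-6 ≤ y ∧ y < 6 ∧ -8 ≤ x ∧ x + L ≤ 8)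
     else decide (-8 ≤ x ∧ x < 8 ∧ -6 ≤ y ∧ y + L ≤ 6))

-- Pre_ excludes exactly the inputs on which A raises IndexError (a word running off the grid).
def Pre_get_count_from_words_pos (words_pos : List (String × Int × Int × String)) : Prop :=
  ∀ p ∈ words_pos, pvOkWord p.1.length p.2.1 p.2.2.1 p.2.2.2 = true
instance (words_pos : List (String × Int × Int × String)) : Decidable (Pre_get_count_from_words_pos words_pos) := by unfold Pre_get_count_from_words_pos; infer_instance

def pvWitness_get_count_from_words_pos : (List (String × Int × Int × String)) :=
  [("cat", 0, 0, "horizontal"), ("car", 0, 0, "vertical"), ("x", -1, -1, "vertical")]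

def Spec_get_count_from_words_pos (words_pos : List (String × Int × Int × String)) (out : Int) : Prop := out = get_count_from_words_pos_alt words_pos
instance (words_pos : List (String × Int × Int × String)) (out : Int) : Decidable (Spec_get_count_from_words_pos words_pos out) := by unfold Spec_get_count_from_words_pos; infer_instance

-- ===== CLAIM (what is proved, stated in full; the proofs are below) =====
def Claim_equal_get_count_from_words_pos : Prop := ∀ (words_pos : List (String × Int × Int × String)), Dom_get_count_from_words_pos words_pos → Pre_get_count_from_words_pos words_pos → Spec_get_count_from_words_pos words_pos (get_count_from_words_pos words_pos)

-- ===== LEMMAS AND PROOFS =====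

-- weighted sum of a list
def pvWSum {α : Type} (f : α → Int) (xs : List α) : Int := (xs.map f).sum

def pvW (c : Int) : Int := if c ≠ 0 then 1 else 0

def pvSum (g : List (List Int)) : Int := pvWSum (fun r => pvWSum (fun c => c) r) g
def pvOcc (g : List (List Int)) : Int := pvWSum (fun r => pvWSum pvW r) g

-- grid well-formedness invariant
def pvGood (g : List (List Int)) : Prop :=
  g.length = 6 ∧ ∀ r ∈ g, r.length = 8 ∧ ∀ v ∈ r, 0 ≤ v

theorem pvWSum_set {α : Type} (f : α → Int) (xs : List α) (j : Nat) (v : α)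
    (h : j < xs.length) :
    pvWSum f (xs.set j v) = pvWSum f xs + f v - f xs[j] := by
  induction xs generalizing j with
  | nil => simp at h
  | cons a as ih =>
    cases j with
    | zero => simp [pvWSum]; ring
    | succ j =>
      have hj : j < as.length := by simpa using h
      have hrec := ih j hj
      simp only [List.set_cons_succ, pvWSum, List.map_cons, List.sum_cons,
        List.getElem_cons_succ] at *
      omega

theorem pvNorm_lemma (n : Nat) (i : Int) (h : PySem.Raise.InRange n i) :
    PySem.List.pyIdx? n i = some (if 0 ≤ i then i.toNat else n - (-i).toNat) ∧
    (if 0 ≤ i then i.toNat else n - (-i).toNat) < n := by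
  obtain ⟨h1, h2⟩ := h
  by_cases h0 : 0 ≤ i
  · rw [if_pos h0]
    exact ⟨by simp [PySem.List.pyIdx?, h0, h2], by omega⟩
  · rw [if_neg h0]
    exact ⟨by simp [PySem.List.pyIdx?, h0, h1], by omega⟩

theorem pvGetD_norm {α : Type} (xs : List α) (i : Int) (d : α)
    (h : PySem.Raise.InRange xs.length i) :
    ∃ j : Nat, j = (if 0 ≤ i then i.toNat else xs.length - (-i).toNat) ∧
      ∃ hj : j < xs.length,
      PySem.List.pyGetD xs i d = xs[j] ∧
      ∀ v : α, PySem.List.pySetD xs i v = xs.set j v := by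
  obtain ⟨heq, hlt⟩ := pvNorm_lemma xs.length i h
  refine ⟨_, rfl, hlt, ?_, ?_⟩
  · simp [PySem.List.pyGetD, PySem.List.pyGet?, heq, List.getElem?_eq_getElem hlt]
  · intro v; simp [PySem.List.pySetD, PySem.List.pySet?, heq]

-- one increment: shape preserved, sum +1, occ + (1 iff cell was 0), new cell = old + 1
theorem pvInc2d_spec (g : List (List Int)) (y x : Int) (hg : pvGood g)
    (hy : PySem.Raise.InRange 6 y) (hx : PySem.Raise.InRange 8 x) :
    pvGood (pvInc2d g y x) ∧
    pvSum (pvInc2d g y x) = pvSum g + 1 ∧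
    pvOcc (pvInc2d g y x) = pvOcc g + (1 - pvW (pvGet2d g y x)) ∧
    pvGet2d (pvInc2d g y x) y x = pvGet2d g y x + 1 ∧
    0 ≤ pvGet2d g y x := by
  obtain ⟨hlen, hrows⟩ := hg
  have hy' : PySem.Raise.InRange g.length y := by rw [hlen]; exact hy
  obtain ⟨jy, hjydef, hjy, hgety, hsety⟩ := pvGetD_norm g y ([] : List Int) hy'
  have hrow := hrows g[jy] (List.getElem_mem hjy)
  have hx' : PySem.Raise.InRange g[jy].length x := by rw [hrow.1]; exact hx
  obtain ⟨jx, hjxdef, hjx, hgetx, hsetx⟩ := pvGetD_norm g[jy] x (0 : Int) hx'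
  have hold : 0 ≤ g[jy][jx] := hrow.2 _ (List.getElem_mem hjx)
  -- the updated row / grid
  have hrw : pvInc2d g y x = g.set jy (g[jy].set jx (g[jy][jx] + 1)) := by
    simp only [pvInc2d, hgety, hgetx, hsetx, hsety]
  have hget2d : pvGet2d g y x = g[jy][jx] := by
    simp only [pvGet2d, hgety, hgetx]
  have hlen' : (g.set jy (g[jy].set jx (g[jy][jx] + 1))).length = g.length := by
    simp
  -- reading back the updated cell
  have hget2d' : pvGet2d (pvInc2d g y x) y x = g[jy][jx] + 1 := by
    rw [hrw]
    have hyn : PySem.Raise.InRange (g.set jy (g[jy].set jx (g[jy][jx] + 1))).length y := by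
      rw [hlen', hlen]; exact hy
    obtain ⟨ky, hkydef, hky, hgetky, _⟩ :=
      pvGetD_norm (g.set jy (g[jy].set jx (g[jy][jx] + 1))) y ([] : List Int) hyn
    have hkyeq : ky = jy := by rw [hkydef, List.length_set]; exact hjydef.symm
    simp only [hkyeq] at hgetky
    have hrowky : (g.set jy (g[jy].set jx (g[jy][jx] + 1)))[jy]'(by rwa [hkyeq] at hky) = g[jy].set jx (g[jy][jx] + 1) := by
      rw [List.getElem_set_self]
    have hxn : PySem.Raise.InRange ((g[jy].set jx (g[jy][jx] + 1)).length) x := by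
      rw [List.length_set, hrow.1]; exact hx
    obtain ⟨kx, hkxdef, hkx, hgetkx, _⟩ :=
      pvGetD_norm (g[jy].set jx (g[jy][jx] + 1)) x (0 : Int) hxn
    have hkxeq : kx = jx := by rw [hkxdef, List.length_set]; exact hjxdef.symm
    simp only [hkxeq] at hgetkx
    simp only [pvGet2d, hgetky, hrowky] at hgetkx ⊢
    rw [hgetkx, List.getElem_set_self]
  refine ⟨?_, ?_, ?_, by rw [hget2d]; exact hget2d', by rw [hget2d]; exact hold⟩
  · -- pvGood preserved
    rw [hrw]
    refine ⟨by simp [hlen], ?_⟩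
    intro r hr
    rw [List.mem_iff_getElem] at hr
    obtain ⟨k, hk, rfl⟩ := hr
    rw [List.getElem_set]
    split_ifs with hkj
    · refine ⟨by simp [hrow.1], ?_⟩
      intro v hv
      rw [List.mem_iff_getElem] at hv
      obtain ⟨m, hm, rfl⟩ := hv
      rw [List.getElem_set]
      split_ifs with hmj
      · omega
      · exact hrow.2 _ (List.getElem_mem _)
    · exact hrows _ (List.getElem_mem _)
  · -- sum + 1
    rw [hrw]
    unfold pvSum
    rw [pvWSum_set _ g jy _ hjy, pvWSum_set _ g[jy] jx _ hjx]
    ring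
  · -- occ
    rw [hrw, hget2d]
    unfold pvOcc
    rw [pvWSum_set _ g jy _ hjy, pvWSum_set _ g[jy] jx _ hjx]
    have h1 : pvW (g[jy][jx] + 1) = 1 := by unfold pvW; split_ifs with h <;> omega
    rw [h1]
    ring

def pvOkPath (L : Nat) (x y : Int) (mode : String) : Prop := pvOkWord L x y mode = true

theorem pvPlace_rel (cs : List Char) (x y : Int) (mode : String) (dx dy : Int)
    (hd : (dx, dy) = if mode = "horizontal" then ((1 : Int), (0 : Int)) else (0, 1))
    (g : List (List Int)) (c t : Int) (hg : pvGood g)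
    (hr : pvOkPath cs.length x y mode) :
    (pvPlaceB cs x y dx dy (g, t)).1 = (pvPlaceA cs x y mode (g, c)).1 ∧
    pvGood (pvPlaceA cs x y mode (g, c)).1 ∧
    (pvPlaceA cs x y mode (g, c)).2
      = c + (pvSum (pvPlaceA cs x y mode (g, c)).1 - pvOcc (pvPlaceA cs x y mode (g, c)).1)
          - (pvSum g - pvOcc g) ∧
    (pvPlaceB cs x y dx dy (g, t)).2 = t + (pvSum (pvPlaceA cs x y mode (g, c)).1 - pvSum g) := by
  induction cs generalizing x y g c t with
  | nil => refine ⟨rfl, hg, ?_, ?_⟩ <;> simp only [pvPlaceA, pvPlaceB] <;> ring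
  | cons ch cs ih =>
    -- extract the in-range facts for the current cell and the rest of the path
    by_cases hm : mode = "horizontal"
    · have hxy : (-6 ≤ y ∧ y < 6 ∧ -8 ≤ x ∧ x + ((cs.length : Int) + 1) ≤ 8) := by
        unfold pvOkPath pvOkWord at hr
        simp [hm] at hr
        omega
      have hy : PySem.Raise.InRange 6 y := ⟨by push_cast; omega, by push_cast; omega⟩
      have hx : PySem.Raise.InRange 8 x := ⟨by push_cast; omega, by push_cast; omega⟩
      have hr' : pvOkPath cs.length (x + 1) y mode := by
        unfold pvOkPath pvOkWord
        rcases cs with _ | _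
        · simp
        · simp [hm]
          push_cast [List.length_cons] at hxy ⊢
          omega
      obtain ⟨hdx, hdy⟩ : dx = 1 ∧ dy = 0 := by
        rw [if_pos hm] at hd
        exact ⟨congrArg Prod.fst hd, congrArg Prod.snd hd⟩
      subst hdx hdy
      obtain ⟨hg', hS, hO, hGet, hOld⟩ := pvInc2d_spec g y x hg hy hx
      have hA : pvPlaceA (ch :: cs) x y mode (g, c)
          = pvPlaceA cs (x + 1) y mode
              (pvInc2d g y x, if 1 < pvGet2d (pvInc2d g y x) y x then c + 1 else c) := by
        simp [pvPlaceA, hm]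
      have hB : pvPlaceB (ch :: cs) x y 1 0 (g, t)
          = pvPlaceB cs (x + 1) y 1 0 (pvInc2d g y x, t + 1) := by
        simp [pvPlaceB]
      rw [hA, hB]
      obtain ⟨ih1, ih2, ih3, ih4⟩ := ih (x + 1) y
        (pvInc2d g y x) (if 1 < pvGet2d (pvInc2d g y x) y x then c + 1 else c) (t + 1) hg' hr'
      refine ⟨ih1, ih2, ?_, ?_⟩
      · rw [ih3, hS, hO, hGet]
        have : (if 1 < pvGet2d g y x + 1 then c + 1 else c) = c + pvW (pvGet2d g y x) := by
          unfold pvW; split_ifs <;> omega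
        rw [this]; ring
      · rw [ih4, hS]; ring
    · have hxy : (-8 ≤ x ∧ x < 8 ∧ -6 ≤ y ∧ y + ((cs.length : Int) + 1) ≤ 6) := by
        unfold pvOkPath pvOkWord at hr
        simp [hm] at hr
        omega
      have hy : PySem.Raise.InRange 6 y := ⟨by push_cast; omega, by push_cast; omega⟩
      have hx : PySem.Raise.InRange 8 x := ⟨by push_cast; omega, by push_cast; omega⟩
      have hr' : pvOkPath cs.length x (y + 1) mode := by
        unfold pvOkPath pvOkWord
        rcases cs with _ | _
        · simp
        · simp [hm]
          push_cast [List.length_cons] at hxy ⊢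
          omega
      obtain ⟨hdx, hdy⟩ : dx = 0 ∧ dy = 1 := by
        rw [if_neg hm] at hd
        exact ⟨congrArg Prod.fst hd, congrArg Prod.snd hd⟩
      subst hdx hdy
      obtain ⟨hg', hS, hO, hGet, hOld⟩ := pvInc2d_spec g y x hg hy hx
      have hA : pvPlaceA (ch :: cs) x y mode (g, c)
          = pvPlaceA cs x (y + 1) mode
              (pvInc2d g y x, if 1 < pvGet2d (pvInc2d g y x) y x then c + 1 else c) := by
        simp [pvPlaceA, hm]
      have hB : pvPlaceB (ch :: cs) x y 0 1 (g, t)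
          = pvPlaceB cs x (y + 1) 0 1 (pvInc2d g y x, t + 1) := by
        simp [pvPlaceB]
      rw [hA, hB]
      obtain ⟨ih1, ih2, ih3, ih4⟩ := ih x (y + 1)
        (pvInc2d g y x) (if 1 < pvGet2d (pvInc2d g y x) y x then c + 1 else c) (t + 1) hg' hr'
      refine ⟨ih1, ih2, ?_, ?_⟩
      · rw [ih3, hS, hO, hGet]
        have : (if 1 < pvGet2d g y x + 1 then c + 1 else c) = c + pvW (pvGet2d g y x) := by
          unfold pvW; split_ifs <;> omega
        rw [this]; ring
      · rw [ih4, hS]; ring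

theorem pvRowFold (r : List Int) (a : Int) :
    r.foldl (fun a c => if c ≠ 0 then a + 1 else a) a = a + pvWSum pvW r := by
  induction r generalizing a with
  | nil => simp [pvWSum]
  | cons c cs ih =>
    simp only [List.foldl_cons]
    rw [ih]
    simp only [pvWSum, List.map_cons, List.sum_cons, pvW]
    split_ifs <;> ring

theorem pvGridFold (g : List (List Int)) (a : Int) :
    g.foldl (fun a row => row.foldl (fun a c => if c ≠ 0 then a + 1 else a) a) a
      = a + pvWSum (fun r => pvWSum pvW r) g := by
  induction g generalizing a with
  | nil => simp [pvWSum]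
  | cons r rs ih =>
    simp only [List.foldl_cons]
    rw [ih, pvRowFold]
    simp only [pvWSum, List.map_cons, List.sum_cons]
    ring

theorem pvOccupied_eq (g : List (List Int)) : pvOccupied g = pvOcc g := by
  unfold pvOccupied pvOcc
  rw [pvGridFold]
  ring

theorem pvFold_rel (wp : List (String × Int × Int × String))
    (hpre : ∀ p ∈ wp, pvOkWord p.1.length p.2.1 p.2.2.1 p.2.2.2 = true)
    (g : List (List Int)) (c t : Int) (hg : pvGood g)
    (hc : c = pvSum g - pvOcc g) (ht : t = pvSum g) :
    (wp.foldl (fun st p =>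
        let d : Int × Int := if p.2.2.2 = "horizontal" then (1, 0) else (0, 1)
        pvPlaceB p.1.toList p.2.1 p.2.2.1 d.1 d.2 st) (g, t)).1
      = (wp.foldl (fun st p => pvPlaceA p.1.toList p.2.1 p.2.2.1 p.2.2.2 st) (g, c)).1 ∧
    pvGood (wp.foldl (fun st p => pvPlaceA p.1.toList p.2.1 p.2.2.1 p.2.2.2 st) (g, c)).1 ∧
    (wp.foldl (fun st p => pvPlaceA p.1.toList p.2.1 p.2.2.1 p.2.2.2 st) (g, c)).2
      = pvSum (wp.foldl (fun st p => pvPlaceA p.1.toList p.2.1 p.2.2.1 p.2.2.2 st) (g, c)).1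
        - pvOcc (wp.foldl (fun st p => pvPlaceA p.1.toList p.2.1 p.2.2.1 p.2.2.2 st) (g, c)).1 ∧
    (wp.foldl (fun st p =>
        let d : Int × Int := if p.2.2.2 = "horizontal" then (1, 0) else (0, 1)
        pvPlaceB p.1.toList p.2.1 p.2.2.1 d.1 d.2 st) (g, t)).2
      = pvSum (wp.foldl (fun st p => pvPlaceA p.1.toList p.2.1 p.2.2.1 p.2.2.2 st) (g, c)).1 := by
  induction wp generalizing g c t with
  | nil => exact ⟨rfl, hg, hc, ht⟩
  | cons p ps ih =>
    have hok := hpre p (List.mem_cons_self ..)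
    have hokl : pvOkPath p.1.toList.length p.2.1 p.2.2.1 p.2.2.2 := by
      unfold pvOkPath
      simpa using hok
    have hd : ((if p.2.2.2 = "horizontal" then ((1 : Int), (0 : Int)) else (0, 1)).1,
              (if p.2.2.2 = "horizontal" then ((1 : Int), (0 : Int)) else (0, 1)).2)
        = if p.2.2.2 = "horizontal" then ((1 : Int), (0 : Int)) else (0, 1) := rfl
    obtain ⟨h1, h2, h3, h4⟩ := pvPlace_rel p.1.toList p.2.1 p.2.2.1 p.2.2.2 _ _ hd g c t hg hokl
    have hBpair : pvPlaceB p.1.toList p.2.1 p.2.2.1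
        (if p.2.2.2 = "horizontal" then ((1 : Int), (0 : Int)) else (0, 1)).1
        (if p.2.2.2 = "horizontal" then ((1 : Int), (0 : Int)) else (0, 1)).2 (g, t)
        = ((pvPlaceA p.1.toList p.2.1 p.2.2.1 p.2.2.2 (g, c)).1,
           (pvPlaceB p.1.toList p.2.1 p.2.2.1
             (if p.2.2.2 = "horizontal" then ((1 : Int), (0 : Int)) else (0, 1)).1
             (if p.2.2.2 = "horizontal" then ((1 : Int), (0 : Int)) else (0, 1)).2 (g, t)).2) := by
      rw [← h1]
    have hstep := ih (fun q hq => hpre q (List.mem_cons_of_mem _ hq))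
      (pvPlaceA p.1.toList p.2.1 p.2.2.1 p.2.2.2 (g, c)).1
      (pvPlaceA p.1.toList p.2.1 p.2.2.1 p.2.2.2 (g, c)).2
      (pvPlaceB p.1.toList p.2.1 p.2.2.1
        (if p.2.2.2 = "horizontal" then ((1 : Int), (0 : Int)) else (0, 1)).1
        (if p.2.2.2 = "horizontal" then ((1 : Int), (0 : Int)) else (0, 1)).2 (g, t)).2
      h2 (by rw [h3, hc]; ring) (by rw [h4, ht]; ring)
    simp only [List.foldl_cons]
    rw [hBpair]
    simpa only [Prod.mk.eta] using hstep

theorem pvGood_init : pvGood pvGridInit := by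
  refine ⟨rfl, ?_⟩
  intro r hr
  have hre := List.eq_of_mem_replicate hr
  subst hre
  exact ⟨rfl, by intro v hv; simp [List.eq_of_mem_replicate hv]⟩

-- ===== VERDICT (by name: the statement is the Claim_ definition above) =====
theorem get_count_from_words_pos_spec : Claim_equal_get_count_from_words_pos := by
  intro wp _ hpre
  have h := pvFold_rel wp hpre pvGridInit 0 0 pvGood_init (by decide) (by decide)
  simp only at h
  obtain ⟨hB1, _, hA2, hB2⟩ := h
  simp only [Spec_get_count_from_words_pos, get_count_from_words_pos,
    get_count_from_words_pos_alt]
  rw [hA2, hB2, hB1, pvOccupied_eq]
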